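-- pv_equiv track=rewrite | github.com/Indranil2020/DFT_visual | DFT_MCP/psi4/psi4-mcp-server/src/psi4_mcp/tools/utilities/structure_builder.py | get_molecular_formula
-- ===== SOURCE A (Python) =====
-- from typing import Any, ClassVar, Dict, List, Optional, Tuple
--
-- def get_molecular_formula(atoms: List[Tuple[str, float, float, float]]) -> str:
--     """Get molecular formula from atoms."""
--     from collections import Counter
--     counts = Counter(symbol for symbol, _, _, _ in atoms)
--
--     # Standard ordering: C, H, then alphabetical
--     formula_parts = []
--     if "C" in counts:
--         formula_parts.append(f"C{counts['C']}" if counts['C'] > 1 else "C")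
--         del counts["C"]
--     if "H" in counts:
--         formula_parts.append(f"H{counts['H']}" if counts['H'] > 1 else "H")
--         del counts["H"]
--
--     for symbol in sorted(counts.keys()):
--         count = counts[symbol]
--         formula_parts.append(f"{symbol}{count}" if count > 1 else symbol)
--
--     return "".join(formula_parts)
-- ===== SOURCE B (Python) =====
-- def get_molecular_formula(atoms):
--     """Get molecular formula from atoms."""
--     # Sort the raw symbol list (not a Counter) under a priority key, then
--     # run-length encode adjacent equal symbols in one accumulator pass.
--     def key(s):
--         return "0" if s == "C" else "1" if s == "H" else "2" + s
--
--     parts = []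
--     prev = None
--     cnt = 0
--     for s in sorted((sym for sym, _, _, _ in atoms), key=key):
--         if s == prev:
--             cnt += 1
--         else:
--             if prev is not None:
--                 parts.append(f"{prev}{cnt}" if cnt > 1 else prev)
--             prev = s
--             cnt = 1
--     if prev is not None:
--         parts.append(f"{prev}{cnt}" if cnt > 1 else prev)
--     return "".join(parts)
-- ===== Notes on version B (the rewrite author's own statement) =====
-- stated objective: alternative
-- what changed: Drops the Counter entirely: B sorts the raw symbol list under a priority key (C, H, then alphabetical) and run-length encodes adjacent equal symbols in a single accumulator pass, instead of A's count-then-special-case-C/H-then-sort-remaining-keys staging.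
import Mathlib
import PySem

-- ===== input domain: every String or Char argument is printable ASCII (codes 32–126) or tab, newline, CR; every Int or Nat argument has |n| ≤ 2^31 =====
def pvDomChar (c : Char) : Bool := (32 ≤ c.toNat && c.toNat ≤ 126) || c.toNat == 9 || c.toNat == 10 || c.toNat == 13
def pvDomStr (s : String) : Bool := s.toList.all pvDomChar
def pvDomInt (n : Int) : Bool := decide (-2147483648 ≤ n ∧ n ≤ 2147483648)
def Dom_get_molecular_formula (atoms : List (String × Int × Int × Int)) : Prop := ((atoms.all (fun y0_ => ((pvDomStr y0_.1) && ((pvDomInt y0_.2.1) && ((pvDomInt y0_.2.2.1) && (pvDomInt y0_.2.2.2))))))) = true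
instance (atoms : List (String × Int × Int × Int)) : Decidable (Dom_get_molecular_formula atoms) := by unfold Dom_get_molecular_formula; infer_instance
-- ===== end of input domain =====

-- B drops the Counter: it sorts the raw symbol list under a priority key (C, H, then
-- alphabetical) and run-length encodes adjacent equal symbols in one accumulator pass
-- (alternative algorithm, same observable result).

-- ===== PORT A =====
def get_molecular_formula (atoms : List (String × Int × Int × Int)) : String :=
  let counts := PySem.Dict.counter (atoms.map (fun a => a.1))
  let parts : List String := []
  let st :=
    if counts.contains "C" then
      (parts ++ [if counts.getD "C" 0 > 1 then "C" ++ PySem.Int.toStr (counts.getD "C" 0) else "C"],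
       counts.erase "C")
    else (parts, counts)
  let st :=
    if st.2.contains "H" then
      (st.1 ++ [if st.2.getD "H" 0 > 1 then "H" ++ PySem.Int.toStr (st.2.getD "H" 0) else "H"],
       st.2.erase "H")
    else st
  let parts :=
    (PySem.List.sorted st.2.keys (fun s => s)).foldl
      (fun acc symbol =>
        acc ++ [if st.2.getD symbol 0 > 1 then symbol ++ PySem.Int.toStr (st.2.getD symbol 0) else symbol])
      st.1
  PySem.Str.join "" parts

-- ===== PORT B =====
-- key(s): "0" for "C", "1" for "H", "2"+s otherwise
def pvKey_get_molecular_formula (symbol : String) : String :=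
  if symbol = "C" then "0" else if symbol = "H" then "1" else "2" ++ symbol

-- parts.append(f"{s}{c}" if c > 1 else s)
def pvPart_get_molecular_formula (s : String) (c : Int) : String :=
  if c > 1 then s ++ PySem.Int.toStr c else s

-- the loop body of Source B: state = (parts, prev, cnt)
def pvStep_get_molecular_formula (st : List String × Option String × Int) (s : String) :
    List String × Option String × Int :=
  if st.2.1 = some s then (st.1, st.2.1, st.2.2 + 1)
  else
    ((match st.2.1 with
      | some p => st.1 ++ [pvPart_get_molecular_formula p st.2.2]
      | none => st.1), some s, 1)

-- the trailing 'if prev is not None: parts.append(...)' flush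
def pvFlush_get_molecular_formula (st : List String × Option String × Int) : List String :=
  match st.2.1 with
  | some p => st.1 ++ [pvPart_get_molecular_formula p st.2.2]
  | none => st.1

def get_molecular_formula_alt (atoms : List (String × Int × Int × Int)) : String :=
  let syms := PySem.List.sorted (atoms.map (fun a => a.1)) pvKey_get_molecular_formula
  let st := syms.foldl pvStep_get_molecular_formula ([], none, 0)
  PySem.Str.join "" (pvFlush_get_molecular_formula st)

-- ===== PRECONDITION & SPEC =====
def Spec_get_molecular_formula (atoms : List (String × Int × Int × Int)) (out : String) : Prop := out = get_molecular_formula_alt atoms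
instance (atoms : List (String × Int × Int × Int)) (out : String) : Decidable (Spec_get_molecular_formula atoms out) := by unfold Spec_get_molecular_formula; infer_instance

-- ===== CLAIM (what is proved, stated in full; the proofs are below) =====
def Claim_equal_get_molecular_formula : Prop := ∀ (atoms : List (String × Int × Int × Int)), Dom_get_molecular_formula atoms → Spec_get_molecular_formula atoms (get_molecular_formula atoms)

-- ===== LEMMAS AND PROOFS =====

theorem pv_keys_erase {κ ν : Type} [BEq κ] (d : PySem.Dict κ ν) (k : κ) :
    (d.erase k).keys = d.keys.filter (fun x => !(x == k)) := by
  show List.map _ (List.filter _ _) = List.filter _ (List.map _ _)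
  rw [List.filter_map]
  rfl

theorem pv_find?_filter_ne {κ ν : Type} [BEq κ] [LawfulBEq κ] (l : List (κ × ν)) (k k' : κ)
    (h : k' ≠ k) :
    (l.filter (fun p => !(p.1 == k))).find? (fun p => p.1 == k') = l.find? (fun p => p.1 == k') := by
  induction l with
  | nil => rfl
  | cons p t ih =>
    by_cases h1 : p.1 = k'
    · have hk : (p.1 == k) = false := by simp [h1, h]
      simp only [List.filter_cons]
      rw [hk]
      simp [h1]
    · by_cases h2 : p.1 = k
      · simp [List.filter_cons, h2, List.find?_cons, Ne.symm h, ih,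
          show (p.1 == k') = false by simp [h1]]
      · simp [List.filter_cons, List.find?_cons, show (p.1 == k) = false by simp [h2],
          show (p.1 == k') = false by simp [h1], ih]

theorem pv_get?_erase_ne {κ ν : Type} [BEq κ] [LawfulBEq κ] (d : PySem.Dict κ ν) (k k' : κ)
    (h : k' ≠ k) : (d.erase k).get? k' = d.get? k' := by
  simp [PySem.Dict.erase, PySem.Dict.get?, pv_find?_filter_ne d.items k k' h]

theorem pv_getD_erase_ne {κ ν : Type} [BEq κ] [LawfulBEq κ] (d : PySem.Dict κ ν) (k k' : κ)
    (h : k' ≠ k) (dflt : ν) : (d.erase k).getD k' dflt = d.getD k' dflt := by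
  simp [PySem.Dict.getD, pv_get?_erase_ne d k k' h]

theorem pv_contains_erase_ne {κ ν : Type} [BEq κ] [LawfulBEq κ] (d : PySem.Dict κ ν) (k k' : κ)
    (h : k' ≠ k) : (d.erase k).contains k' = d.contains k' := by
  rw [PySem.Dict.contains_eq_isSome_get?, PySem.Dict.contains_eq_isSome_get?,
    pv_get?_erase_ne d k k' h]

theorem pv_toList_lit : ("0" : String).toList = ['0'] ∧ ("1" : String).toList = ['1'] ∧ ("2" : String).toList = ['2'] := by
  decide

theorem pv_lit_lt_two_append (s b : String) (hs : s.toList = ['0'] ∨ s.toList = ['1']) :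
    s < "2" ++ b := by
  rw [String.lt_iff_toList_lt, String.toList_append, pv_toList_lit.2.2]
  simp only [List.singleton_append]
  rcases hs with h | h <;> rw [h, List.cons_lt_cons_iff] <;> left <;> decide

theorem pv_two_append_lt (a b : String) (h : a < b) : ("2" ++ a : String) < "2" ++ b := by
  rw [String.lt_iff_toList_lt, String.toList_append, String.toList_append, pv_toList_lit.2.2]
  simp only [List.singleton_append]
  rw [List.cons_lt_cons_iff]
  right
  exact ⟨rfl, String.lt_iff_toList_lt.mp h⟩

theorem pv_sorted_id_pairwise_lt (xs : List String) (h : xs.Nodup) :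
    (PySem.List.sorted xs (fun s => s)).Pairwise (· < ·) := by
  have h1 := PySem.List.sorted_pairwise xs (fun s => s)
  have h2 : (PySem.List.sorted xs (fun s => s)).Nodup :=
    (PySem.List.sorted_perm xs (fun s => s) false).nodup_iff.mpr h
  exact (h1.and h2).imp (fun ⟨hle, hne⟩ => lt_of_le_of_ne hle hne)

theorem pv_key_order (ks : List String) (hnd : ks.Nodup) :
    PySem.List.sorted ks pvKey_get_molecular_formula =
      ((if "C" ∈ ks then ["C"] else []) ++ (if "H" ∈ ks then ["H"] else []) ++
        PySem.List.sorted (ks.filter (fun s => !(s == "H") && !(s == "C"))) (fun s => s)) := by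
  have hrestmem : ∀ a ∈ PySem.List.sorted (ks.filter (fun s => !(s == "H") && !(s == "C"))) (fun s => s),
      a ≠ "C" ∧ a ≠ "H" := by
    intro a ha
    have := ((PySem.List.sorted_perm _ _ false).mem_iff.mp ha)
    have := List.of_mem_filter this
    simp at this
    exact ⟨this.2, this.1⟩
  have hkeyrest : ∀ a, a ≠ "C" → a ≠ "H" → pvKey_get_molecular_formula a = "2" ++ a := by
    intro a h1 h2; simp [pvKey_get_molecular_formula, h1, h2]
  apply PySem.List.sorted_eq_of_perm_of_pairwise_lt
  · -- permutation
    rw [List.append_assoc]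
    have p1 := List.filter_append_perm (fun s => s == "C") ks
    have e1 : ks.filter (fun s => s == "C") = (if "C" ∈ ks then ["C"] else []) := by
      rw [List.filter_beq]
      by_cases h : "C" ∈ ks
      · simp [h, List.count_eq_one_of_mem hnd h]
      · simp [h, List.count_eq_zero_of_not_mem h]
    have hr1nd : (ks.filter (fun s => !(s == "C"))).Nodup := hnd.filter _
    have p2 := List.filter_append_perm (fun s => s == "H") (ks.filter (fun s => !(s == "C")))
    have e2 : (ks.filter (fun s => !(s == "C"))).filter (fun s => s == "H")
        = (if "H" ∈ ks then ["H"] else []) := by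
      rw [List.filter_beq]
      have hm : "H" ∈ ks.filter (fun s => !(s == "C")) ↔ "H" ∈ ks := by
        simp [List.mem_filter]
      by_cases h : "H" ∈ ks
      · simp [h, List.count_eq_one_of_mem hr1nd (hm.mpr h)]
      · simp [h, List.count_eq_zero_of_not_mem (fun hc => h (hm.mp hc))]
    have e3 : (ks.filter (fun s => !(s == "C"))).filter (fun s => !(s == "H"))
        = ks.filter (fun s => !(s == "H") && !(s == "C")) := List.filter_filter
    refine (List.Perm.append_left _ (List.Perm.append_left _ (PySem.List.sorted_perm _ _ false))).trans ?_
    rw [← e1, ← e2, ← e3]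
    exact (List.Perm.append_left _ p2).trans p1
  · -- pairwise strictly increasing keys
    rw [List.append_assoc, List.pairwise_append]
    refine ⟨?_, ?_, ?_⟩
    · split <;> simp
    · rw [List.pairwise_append]
      refine ⟨by split <;> simp, ?_, ?_⟩
      · refine ((pv_sorted_id_pairwise_lt _ (hnd.filter _)).imp_of_mem ?_)
        intro a b ha hb hab
        obtain ⟨ha1, ha2⟩ := hrestmem a ha
        obtain ⟨hb1, hb2⟩ := hrestmem b hb
        rw [hkeyrest a ha1 ha2, hkeyrest b hb1 hb2]
        exact pv_two_append_lt a b hab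
      · intro a ha b hb
        have haH : a = "H" := by revert ha; split <;> simp_all
        obtain ⟨hb1, hb2⟩ := hrestmem b hb
        rw [haH, hkeyrest b hb1 hb2,
          show pvKey_get_molecular_formula "H" = "1" by simp [pvKey_get_molecular_formula]]
        exact pv_lit_lt_two_append _ _ (Or.inr pv_toList_lit.2.1)
    · intro a ha b hb
      have haC : a = "C" := by revert ha; split <;> simp_all
      subst haC
      rw [show pvKey_get_molecular_formula "C" = "0" by simp [pvKey_get_molecular_formula]]
      rcases List.mem_append.mp hb with hb | hb
      · have hbH : b = "H" := by revert hb; split <;> simp_all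
        rw [hbH, show pvKey_get_molecular_formula "H" = "1" by simp [pvKey_get_molecular_formula]]
        rw [String.lt_iff_toList_lt]
        decide
      · obtain ⟨hb1, hb2⟩ := hrestmem b hb
        rw [hkeyrest b hb1 hb2]
        exact pv_lit_lt_two_append _ _ (Or.inl pv_toList_lit.1)

theorem pv_foldl_append_map {α β : Type} (f : α → β) (l : List α) (acc : List β) :
    l.foldl (fun a x => a ++ [f x]) acc = acc ++ l.map f := by
  induction l generalizing acc with
  | nil => simp
  | cons x t ih => simp [ih]

theorem pv_mem_sorted_filter (p : String → Bool) (ks : List String) (s : String)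
    (h : s ∈ PySem.List.sorted (ks.filter p) (fun s => s)) : p s = true ∧ s ∈ ks := by
  have := (PySem.List.sorted_perm _ _ false).mem_iff.mp h
  exact ⟨List.of_mem_filter this, List.mem_of_mem_filter this⟩

-- A equals the "mid" form: map pvPart over the keyed-sorted distinct symbols.
theorem pv_A_eq_mid (atoms : List (String × Int × Int × Int)) :
    get_molecular_formula atoms =
      PySem.Str.join ""
        ((PySem.List.sorted (PySem.Dict.counter (atoms.map (fun a => a.1))).keys
            pvKey_get_molecular_formula).map
          (fun s => pvPart_get_molecular_formula s
            ((PySem.Dict.counter (atoms.map (fun a => a.1))).getD s 0))) := by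
  simp only [get_molecular_formula, pvPart_get_molecular_formula]
  set c := PySem.Dict.counter (atoms.map (fun a => a.1)) with hc
  have hknd : c.keys.Nodup := PySem.Dict.nodup_keys_counter _
  have hHC : ("H" : String) ≠ "C" := by decide
  rw [pv_key_order c.keys hknd]
  apply congrArg (PySem.Str.join "")
  by_cases hC : c.contains "C" = true
  · rw [if_pos hC]
    have hmC : ("C" : String) ∈ c.keys := (PySem.Dict.contains_iff_mem_keys c "C").mp hC
    rw [pv_contains_erase_ne c "C" "H" hHC]
    by_cases hH : c.contains "H" = true
    · rw [if_pos hH]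
      have hmH : ("H" : String) ∈ c.keys := (PySem.Dict.contains_iff_mem_keys c "H").mp hH
      rw [if_pos hmC, if_pos hmH]
      rw [pv_foldl_append_map, pv_keys_erase, pv_keys_erase, List.filter_filter,
        pv_getD_erase_ne c "C" "H" hHC]
      simp only [List.map_append, List.map_cons, List.map_nil, List.nil_append,
        List.append_assoc, List.singleton_append]
      apply congrArg
      apply List.map_congr_left
      intro s hs
      obtain ⟨hp, _⟩ := pv_mem_sorted_filter _ _ s hs
      simp only [Bool.and_eq_true, Bool.not_eq_true', beq_eq_false_iff_ne] at hp
      rw [pv_getD_erase_ne _ "H" s hp.1, pv_getD_erase_ne c "C" s hp.2]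
    · rw [if_neg hH]
      have hmH : ("H" : String) ∉ c.keys := fun hm =>
        hH ((PySem.Dict.contains_iff_mem_keys c "H").mpr hm)
      rw [if_pos hmC, if_neg hmH]
      rw [pv_foldl_append_map, pv_keys_erase]
      have hfe : c.keys.filter (fun x => !(x == "C"))
          = c.keys.filter (fun s => !(s == "H") && !(s == "C")) := by
        apply List.filter_congr
        intro x hx
        have : x ≠ "H" := fun h => hmH (h ▸ hx)
        simp [this]
      rw [hfe]
      simp only [List.map_append, List.map_cons, List.map_nil, List.nil_append,
        List.append_assoc, List.singleton_append]
      apply congrArg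
      apply List.map_congr_left
      intro s hs
      obtain ⟨hp, _⟩ := pv_mem_sorted_filter _ _ s hs
      simp only [Bool.and_eq_true, Bool.not_eq_true', beq_eq_false_iff_ne] at hp
      rw [pv_getD_erase_ne c "C" s hp.2]
  · rw [if_neg hC]
    have hmC : ("C" : String) ∉ c.keys := fun hm =>
      hC ((PySem.Dict.contains_iff_mem_keys c "C").mpr hm)
    rw [if_neg hmC]
    by_cases hH : c.contains "H" = true
    · rw [if_pos hH]
      have hmH : ("H" : String) ∈ c.keys := (PySem.Dict.contains_iff_mem_keys c "H").mp hH
      rw [if_pos hmH]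
      rw [pv_foldl_append_map, pv_keys_erase]
      have hfe : c.keys.filter (fun x => !(x == "H"))
          = c.keys.filter (fun s => !(s == "H") && !(s == "C")) := by
        apply List.filter_congr
        intro x hx
        have : x ≠ "C" := fun h => hmC (h ▸ hx)
        simp [this]
      rw [hfe]
      simp only [List.map_append, List.map_cons, List.map_nil, List.nil_append,
        List.append_assoc, List.singleton_append]
      apply congrArg
      apply List.map_congr_left
      intro s hs
      obtain ⟨hp, _⟩ := pv_mem_sorted_filter _ _ s hs
      simp only [Bool.and_eq_true, Bool.not_eq_true', beq_eq_false_iff_ne] at hp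
      rw [pv_getD_erase_ne c "H" s hp.1]
    · rw [if_neg hH]
      have hmH : ("H" : String) ∉ c.keys := fun hm =>
        hH ((PySem.Dict.contains_iff_mem_keys c "H").mpr hm)
      rw [if_neg hmH]
      rw [pv_foldl_append_map]
      have hfe : c.keys
          = c.keys.filter (fun s => !(s == "H") && !(s == "C")) := by
        symm
        rw [List.filter_eq_self]
        intro x hx
        have h1 : x ≠ "H" := fun h => hmH (h ▸ hx)
        have h2 : x ≠ "C" := fun h => hmC (h ▸ hx)
        simp [h1, h2]
      rw [← hfe]
      simp

-- ===== B-side lemmas =====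

theorem pv_toList_injective {a b : String} (h : a.toList = b.toList) : a = b := by
  rw [← String.asString_toList a, ← String.asString_toList b, h]

theorem pv_ne_two_append (x : String) (hx : x.toList = ['0'] ∨ x.toList = ['1'])
    (s : String) : x ≠ "2" ++ s := by
  intro h
  have hcl := congrArg String.toList h
  rw [String.toList_append, pv_toList_lit.2.2] at hcl
  rcases hx with h0 | h0 <;> rw [h0] at hcl <;>
    (simp only [List.singleton_append, List.cons.injEq] at hcl; exact absurd hcl.1 (by decide))

theorem pv_key_inj : Function.Injective pvKey_get_molecular_formula := by
  intro a b h
  unfold pvKey_get_molecular_formula at h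
  split_ifs at h with h1 h2 h3 h4 h5 <;> subst_vars <;>
    first
      | rfl
      | (exact absurd h (by decide))
      | (exact absurd h (pv_ne_two_append _ (Or.inl pv_toList_lit.1) _))
      | (exact absurd h (pv_ne_two_append _ (Or.inr pv_toList_lit.2.1) _))
      | (exact absurd h.symm (pv_ne_two_append _ (Or.inl pv_toList_lit.1) _))
      | (exact absurd h.symm (pv_ne_two_append _ (Or.inr pv_toList_lit.2.1) _))
      | (apply pv_toList_injective;
         have hcl := congrArg String.toList h;
         rw [String.toList_append, String.toList_append, pv_toList_lit.2.2] at hcl;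
         simpa using hcl)

theorem pv_count_flatMap (ks : List String) (f : String → Nat) (a : String) (hnd : ks.Nodup) :
    (ks.flatMap (fun s => List.replicate (f s) s)).count a = if a ∈ ks then f a else 0 := by
  induction ks with
  | nil => simp
  | cons s t ih =>
    rw [List.flatMap_cons, List.count_append, List.count_replicate,
      ih (List.Nodup.of_cons hnd)]
    by_cases has : a = s
    · subst has
      have : a ∉ t := (List.nodup_cons.mp hnd).1
      simp [this]
    · simp [has, Ne.symm has, show (a == s) = false by simp [has]]

theorem pv_perm_flatMap (l : List String) :
    ((PySem.List.sorted (PySem.Dict.counter l).keys pvKey_get_molecular_formula).flatMap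
      (fun s => List.replicate (l.count s) s)).Perm l := by
  have hnd : (PySem.List.sorted (PySem.Dict.counter l).keys pvKey_get_molecular_formula).Nodup :=
    (PySem.List.sorted_perm _ _ false).nodup_iff.mpr (PySem.Dict.nodup_keys_counter _)
  have hmem : ∀ a : String,
      a ∈ PySem.List.sorted (PySem.Dict.counter l).keys pvKey_get_molecular_formula ↔ a ∈ l := by
    intro a
    rw [(PySem.List.sorted_perm _ _ false).mem_iff, PySem.Dict.keys_counter,
      PySem.Set.mem_ofList]
  rw [List.perm_iff_count]
  intro a
  rw [pv_count_flatMap _ _ _ hnd]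
  by_cases h : a ∈ l
  · rw [if_pos ((hmem a).mpr h)]
  · rw [if_neg (fun hc => h ((hmem a).mp hc)), List.count_eq_zero_of_not_mem h]

theorem pv_sorted_key_pairwise_lt (ks : List String) (hnd : ks.Nodup) :
    (PySem.List.sorted ks pvKey_get_molecular_formula).Pairwise
      (fun a b => pvKey_get_molecular_formula a < pvKey_get_molecular_formula b) := by
  have h1 := PySem.List.sorted_pairwise ks pvKey_get_molecular_formula
  have h2 : (PySem.List.sorted ks pvKey_get_molecular_formula).Nodup :=
    (PySem.List.sorted_perm _ _ false).nodup_iff.mpr hnd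
  exact (h1.and h2).imp (fun ⟨hle, hne⟩ =>
    lt_of_le_of_ne hle (fun hk => hne (pv_key_inj hk)))

theorem pv_pairwise_flatMap (ks : List String) (f : String → Nat)
    (h : ks.Pairwise (fun a b => pvKey_get_molecular_formula a < pvKey_get_molecular_formula b)) :
    (ks.flatMap (fun s => List.replicate (f s) s)).Pairwise
      (fun a b => pvKey_get_molecular_formula a ≤ pvKey_get_molecular_formula b) := by
  induction ks with
  | nil => simp
  | cons s t ih =>
    rw [List.flatMap_cons, List.pairwise_append]
    refine ⟨?_, ih (List.Pairwise.of_cons h), ?_⟩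
    · exact List.pairwise_replicate.mpr (Or.inr (le_refl _))
    · intro a ha b hb
      rw [List.eq_of_mem_replicate ha]
      obtain ⟨u, hu, hbu⟩ := List.mem_flatMap.mp hb
      rw [List.eq_of_mem_replicate hbu]
      exact le_of_lt ((List.pairwise_cons.mp h).1 u hu)

theorem pv_sorted_syms (l : List String) :
    PySem.List.sorted l pvKey_get_molecular_formula =
      (PySem.List.sorted (PySem.Dict.counter l).keys pvKey_get_molecular_formula).flatMap
        (fun s => List.replicate (l.count s) s) := by
  have hperm : (PySem.List.sorted l pvKey_get_molecular_formula).Perm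
      ((PySem.List.sorted (PySem.Dict.counter l).keys pvKey_get_molecular_formula).flatMap
        (fun s => List.replicate (l.count s) s)) :=
    (PySem.List.sorted_perm _ _ false).trans (pv_perm_flatMap l).symm
  have h1 : ((PySem.List.sorted l pvKey_get_molecular_formula).map
      pvKey_get_molecular_formula).Sorted (· ≤ ·) := by
    rw [List.Sorted, List.pairwise_map]
    exact PySem.List.sorted_pairwise l pvKey_get_molecular_formula
  have h2 : (((PySem.List.sorted (PySem.Dict.counter l).keys pvKey_get_molecular_formula).flatMap
      (fun s => List.replicate (l.count s) s)).map pvKey_get_molecular_formula).Sorted (· ≤ ·) := by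
    rw [List.Sorted, List.pairwise_map]
    exact pv_pairwise_flatMap _ _
      (pv_sorted_key_pairwise_lt _ (PySem.Dict.nodup_keys_counter _))
  have hmapeq := List.Perm.eq_of_pairwise' h1 h2 (hperm.map pvKey_get_molecular_formula)
  exact List.map_injective_iff.mpr pv_key_inj hmapeq

theorem pv_fold_replicate (n : Nat) (s : String) (parts : List String) (c : Int) :
    (List.replicate n s).foldl pvStep_get_molecular_formula (parts, some s, c)
      = (parts, some s, c + n) := by
  induction n generalizing c with
  | zero => simp
  | succ m ih =>
    rw [List.replicate_succ, List.foldl_cons]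
    show (List.replicate m s).foldl pvStep_get_molecular_formula
      (pvStep_get_molecular_formula (parts, some s, c) s) = _
    rw [show pvStep_get_molecular_formula (parts, some s, c) s = (parts, some s, c + 1) by
      simp [pvStep_get_molecular_formula]]
    rw [ih]
    have : c + 1 + (m : Int) = c + ((m : Nat) + 1 : Nat) := by push_cast; ring
    rw [this]

theorem pv_fold_groups (ks : List String) (f : String → Nat)
    (hpos : ∀ s ∈ ks, 1 ≤ f s) (hnd : ks.Nodup) :
    ∀ (parts : List String) (p : String) (c : Int), p ∉ ks →
      pvFlush_get_molecular_formula
        ((ks.flatMap (fun s => List.replicate (f s) s)).foldl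
          pvStep_get_molecular_formula (parts, some p, c))
        = parts ++ [pvPart_get_molecular_formula p c]
            ++ ks.map (fun s => pvPart_get_molecular_formula s (f s)) := by
  induction ks with
  | nil => intro parts p c _; simp [pvFlush_get_molecular_formula]
  | cons s t ih =>
    intro parts p c hp
    have hps : p ≠ s := fun h => hp (h ▸ List.mem_cons_self ..)
    have hfs : 1 ≤ f s := hpos s (List.mem_cons_self ..)
    rw [List.flatMap_cons, List.foldl_append]
    rw [show List.replicate (f s) s = s :: List.replicate (f s - 1) s by
      rw [← List.replicate_succ]; congr 1; omega]
    rw [List.foldl_cons]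
    rw [show pvStep_get_molecular_formula (parts, some p, c) s
        = (parts ++ [pvPart_get_molecular_formula p c], some s, 1) by
      simp [pvStep_get_molecular_formula, Option.some_inj, hps]]
    rw [pv_fold_replicate]
    rw [show (1 : Int) + ((f s - 1 : Nat) : Int) = ((f s : Nat) : Int) by
      have := hfs; push_cast; omega]
    rw [ih (fun x hx => hpos x (List.mem_cons_of_mem _ hx)) (List.Nodup.of_cons hnd)
      _ s _ ((List.nodup_cons.mp hnd).1)]
    simp [List.append_assoc]

theorem pv_fold_all (ks : List String) (f : String → Nat)
    (hpos : ∀ s ∈ ks, 1 ≤ f s) (hnd : ks.Nodup) :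
    pvFlush_get_molecular_formula
      ((ks.flatMap (fun s => List.replicate (f s) s)).foldl
        pvStep_get_molecular_formula ([], none, 0))
      = ks.map (fun s => pvPart_get_molecular_formula s (f s)) := by
  cases ks with
  | nil => simp [pvFlush_get_molecular_formula]
  | cons s t =>
    have hfs : 1 ≤ f s := hpos s (List.mem_cons_self ..)
    rw [List.flatMap_cons, List.foldl_append]
    rw [show List.replicate (f s) s = s :: List.replicate (f s - 1) s by
      rw [← List.replicate_succ]; congr 1; omega]
    rw [List.foldl_cons]
    rw [show pvStep_get_molecular_formula ([], none, 0) s = ([], some s, 1) by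
      simp [pvStep_get_molecular_formula]]
    rw [pv_fold_replicate]
    rw [show (1 : Int) + ((f s - 1 : Nat) : Int) = ((f s : Nat) : Int) by
      have := hfs; omega]
    rw [pv_fold_groups t f (fun x hx => hpos x (List.mem_cons_of_mem _ hx))
      (List.Nodup.of_cons hnd) _ s _ ((List.nodup_cons.mp hnd).1)]
    simp

theorem pv_B_eq_mid (atoms : List (String × Int × Int × Int)) :
    get_molecular_formula_alt atoms =
      PySem.Str.join ""
        ((PySem.List.sorted (PySem.Dict.counter (atoms.map (fun a => a.1))).keys
            pvKey_get_molecular_formula).map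
          (fun s => pvPart_get_molecular_formula s
            ((PySem.Dict.counter (atoms.map (fun a => a.1))).getD s 0))) := by
  simp only [get_molecular_formula_alt]
  set l := atoms.map (fun a => a.1) with hl
  set ks := PySem.List.sorted (PySem.Dict.counter l).keys pvKey_get_molecular_formula with hks
  have hnd : ks.Nodup :=
    (PySem.List.sorted_perm _ _ false).nodup_iff.mpr (PySem.Dict.nodup_keys_counter _)
  have hpos : ∀ s ∈ ks, 1 ≤ l.count s := by
    intro s hs
    have : s ∈ l := by
      have := (PySem.List.sorted_perm _ _ false).mem_iff.mp hs
      rw [PySem.Dict.keys_counter, PySem.Set.mem_ofList] at this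
      exact this
    exact List.count_pos_iff.mpr this
  rw [pv_sorted_syms l, pv_fold_all ks (fun s => l.count s) hpos hnd]
  apply congrArg (PySem.Str.join "")
  apply List.map_congr_left
  intro s _
  rw [PySem.Dict.getD_counter]

-- ===== VERDICT (by name: the statement is the Claim_ definition above) =====
theorem get_molecular_formula_spec : Claim_equal_get_molecular_formula := by
  intro atoms _
  show get_molecular_formula atoms = get_molecular_formula_alt atoms
  rw [pv_A_eq_mid, pv_B_eq_mid]
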